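-- pv_equiv track=rewrite | github.com/kspra3/Algorithms-and-Programming-Fundamentals | FIT1045Sol/Workshop11/Task2A.py | power2
-- ===== SOURCE A (Python) =====
-- def power2(x,n):
--     'computes x to the power of n'
--     value = 1
--
--     if n > 0:
--         value = power2(x, n // 2)
--     if n % 2 == 0:
--         value = value * value
--     else:
--         value = value * value * x
--
--     return value
-- ===== SOURCE B (Python) =====
-- def power2(x, n):
--     'computes x to the power of n'
--     chain = []
--     m = n
--     while m > 0:
--         chain.append(m)
--         m //= 2
--     chain.append(m)
--     value = 1
--     for m in reversed(chain):
--         if m % 2 == 0: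
--             value = value * value
--         else:
--             value = value * value * x
--     return value
-- ===== Notes on version B (the rewrite author's own statement) =====
-- stated objective: alternative
-- what changed: Replaces the recursion by an explicit loop: first build the list of n-values the recursion would visit (repeated floor-halving), then fold the square/square-times-x step over that list in reverse.
import Mathlib
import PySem

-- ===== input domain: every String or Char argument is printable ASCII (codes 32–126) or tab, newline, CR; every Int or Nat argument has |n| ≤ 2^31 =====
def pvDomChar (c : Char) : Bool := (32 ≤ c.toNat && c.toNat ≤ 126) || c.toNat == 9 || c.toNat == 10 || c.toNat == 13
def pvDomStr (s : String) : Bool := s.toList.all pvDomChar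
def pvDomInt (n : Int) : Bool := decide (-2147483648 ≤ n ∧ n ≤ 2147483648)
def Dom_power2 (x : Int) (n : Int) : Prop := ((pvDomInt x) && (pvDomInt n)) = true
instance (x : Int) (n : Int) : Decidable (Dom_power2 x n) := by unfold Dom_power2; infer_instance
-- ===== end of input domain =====

-- B replaces A's recursion by an explicit loop: it builds the list of n-values the
-- recursion would visit (repeated floor-halving) and folds the square step over it in reverse.


-- ===== PORT A =====
def power2 (x : Int) (n : Int) : Int :=
  -- value = 1; if n > 0: value = power2(x, n // 2)
  let value : Int := if n > 0 then power2 x (PySem.Int.floordiv n 2) else 1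
  -- if n % 2 == 0: value*value  else: value*value*x
  if PySem.Int.mod n 2 = 0 then value * value else value * value * x
termination_by n.toNat
decreasing_by
  rename_i h
  rw [PySem.Int.floordiv_eq_ediv_of_pos (by omega : (0:Int) < 2)]
  omega

-- ===== PORT B =====
-- chain: m = n; while m > 0: append m; m //= 2; then append the final m
def power2Chain (n : Int) : List Int :=
  if n > 0 then n :: power2Chain (PySem.Int.floordiv n 2) else [n]
termination_by n.toNat
decreasing_by
  rename_i h
  rw [PySem.Int.floordiv_eq_ediv_of_pos (by omega : (0:Int) < 2)]
  omega

-- one loop body step of B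
def power2Step (x : Int) (value m : Int) : Int :=
  if PySem.Int.mod m 2 = 0 then value * value else value * value * x

def power2_alt (x : Int) (n : Int) : Int :=
  (power2Chain n).reverse.foldl (power2Step x) 1

-- ===== PRECONDITION & SPEC =====
def Spec_power2 (x : Int) (n : Int) (out : Int) : Prop := out = power2_alt x n
instance (x : Int) (n : Int) (out : Int) : Decidable (Spec_power2 x n out) := by unfold Spec_power2; infer_instance

-- ===== CLAIM (what is proved, stated in full; the proofs are below) =====
def Claim_equal_power2 : Prop := ∀ (x : Int) (n : Int), Dom_power2 x n → Spec_power2 x n (power2 x n)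

-- ===== LEMMAS AND PROOFS =====
theorem power2_alt_eq_aux (x : Int) :
    ∀ (k : Nat) (n : Int), n.toNat ≤ k →
      (power2Chain n).reverse.foldl (power2Step x) 1 = power2 x n := by
  intro k
  induction k with
  | zero =>
    intro n hn
    have h : ¬ n > 0 := by omega
    rw [power2Chain, power2, if_neg h, if_neg h]
    simp [power2Step]
  | succ k ih =>
    intro n hn
    by_cases h : n > 0
    · have hf : PySem.Int.floordiv n 2 = n / 2 :=
        PySem.Int.floordiv_eq_ediv_of_pos (by omega)
      rw [power2Chain, if_pos h, power2, if_pos h]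
      have hrec : (power2Chain (PySem.Int.floordiv n 2)).reverse.foldl (power2Step x) 1
          = power2 x (PySem.Int.floordiv n 2) := by
        apply ih
        rw [hf]; omega
      simp only [List.reverse_cons, List.foldl_append, List.foldl_cons, List.foldl_nil, hrec]
      rfl
    · rw [power2Chain, power2, if_neg h, if_neg h]
      simp [power2Step]

-- ===== VERDICT (by name: the statement is the Claim_ definition above) =====
theorem power2_spec : Claim_equal_power2 := by
  intro x n _
  unfold Spec_power2 power2_alt
  exact (power2_alt_eq_aux x n.toNat n le_rfl).symm
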